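-- pv_equiv track=rewrite | github.com/PoligonTeam/cenzura | femscriptrewrite/femscript-rs/test.py | parse
-- ===== SOURCE A (Python) =====
-- def parse(inp):
--     out = []
--     stack = []
--
--     precedence = {
--         "+": 1,
--         "-": 1,
--         "*": 2,
--         "/": 2,
--         "%": 2
--     }
--
--     skip = 0
--
--     for index, token in enumerate(inp):
--         if skip > index:
--             continue
--
--         if token == "(":
--             tokens = []
--             count = 1
--
--             for token in inp[index+1:]:
--                 if token == "(":
--                     count += 1
--                 elif token == ")":
--                     count -= 1
--
--                 if count == 0:
--                     break
--
--                 tokens.append(token)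
--             else:
--                 raise Exception("Syntax error: ( is not closed")
--
--             skip = index + len(tokens) + 1
--
--             out.extend(parse(tokens))
--         elif token in precedence:
--             if not stack:
--                 stack.append(token)
--             else:
--                 if precedence[token] > precedence[stack[0]]:
--                     stack.insert(0, token)
--                 else:
--                     out.append(stack.pop(0))
--                     stack.append(token)
--         elif token.isdigit():
--             out.append(token)
--
--     out.extend(stack)
--
--     return out
-- ===== SOURCE B (Python) =====
-- def parse(inp):
--     precedence = {
--         "+": 1,
--         "-": 1,
--         "*": 2,
--         "/": 2,
--         "%": 2
--     }
--
--     contexts = []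
--     out = []
--     stack = []
--
--     for token in inp:
--         if token == "(":
--             contexts.append((out, stack))
--             out = []
--             stack = []
--         elif token == ")":
--             if contexts:
--                 inner = out + stack
--                 out, stack = contexts.pop()
--                 out = out + inner
--             # stray ")" at top level is ignored, as in A
--         elif token in precedence:
--             if not stack:
--                 stack.append(token)
--             elif precedence[token] > precedence[stack[0]]:
--                 stack.insert(0, token)
--             else:
--                 out.append(stack.pop(0))
--                 stack.append(token)
--         elif token.isdigit():
--             out.append(token)
--
--     if contexts:
--         raise Exception("Syntax error: ( is not closed")
--
--     return out + stack
-- ===== Notes on version B (the rewrite author's own statement) =====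
-- stated objective: alternative
-- what changed: Replaced A's recursive descent (which re-scans and slices out each parenthesized group, then recurses on the copy, driven by an enumerate/skip loop) by a single left-to-right pass that keeps an explicit stack of (out, opstack) contexts pushed on '(' and popped on ')'.
import Mathlib
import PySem

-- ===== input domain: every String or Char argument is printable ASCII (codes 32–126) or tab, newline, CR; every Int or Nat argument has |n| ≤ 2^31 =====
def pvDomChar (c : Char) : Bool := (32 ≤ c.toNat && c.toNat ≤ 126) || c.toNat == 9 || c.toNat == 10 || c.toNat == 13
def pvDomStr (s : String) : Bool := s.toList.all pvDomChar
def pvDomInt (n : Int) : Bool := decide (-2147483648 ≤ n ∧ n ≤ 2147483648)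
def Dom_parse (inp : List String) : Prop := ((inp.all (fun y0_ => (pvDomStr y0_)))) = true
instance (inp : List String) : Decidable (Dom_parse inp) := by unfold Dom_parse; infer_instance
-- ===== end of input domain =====

-- B replaces A's recursive descent (slice out each parenthesized group, recurse on the copy)
-- by one left-to-right pass with an explicit stack of (out, opstack) contexts (objective: alternative).

-- ===== PORT A =====
-- the 'precedence' dict of both Pythons
def pvPrec? (t : String) : Option Int :=
  if t = "+" then some 1
  else if t = "-" then some 1
  else if t = "*" then some 2
  else if t = "/" then some 2
  else if t = "%" then some 2
  else none

def pvPrec (t : String) : Int := (pvPrec? t).getD 0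

-- A's inner `for token in inp[index+1:]` loop hunting the matching ')' (count starts at 1);
-- `none` = the for-else `raise` (unclosed '(')
def pvScan : List String → Nat → Option (List String)
  | [], _ => none
  | t :: r, c =>
    let c' := if t = "(" then c + 1 else if t = ")" then c - 1 else c
    if c' = 0 then some [] else (pvScan r c').map (t :: ·)

-- A's `for index, token in enumerate(inp)` loop with its `skip`/`continue` mechanism.
-- The recursion is made structural by a fuel counter (a totality guard only:
-- (|inp|+1)^2 steps always suffice, proved in parseGo_runA / parse_spec below);
-- the Python's recursive `parse(tokens)` is the self-call `parseGo fuel tokens 0 [] [] 0`.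
def parseGo : Nat → List String → Nat → List String → List String → Nat → List String
  | 0, _, _, out, stack, _ => out ++ stack
  | fuel + 1, inp, i, out, stack, skip =>
    if h : i < inp.length then
      if skip > i then parseGo fuel inp (i + 1) out stack skip
      else if inp[i] = "(" then
        match pvScan (inp.drop (i + 1)) 1 with
        | none => out ++ stack  -- Python raises "Syntax error: ( is not closed" here; unreachable under Pre_parse
        | some tokens =>
          parseGo fuel inp (i + 1) (out ++ parseGo fuel tokens 0 [] [] 0) stack
            (i + tokens.length + 1)
      else if (pvPrec? inp[i]).isSome then
        match stack with
        | [] => parseGo fuel inp (i + 1) out (stack ++ [inp[i]]) skip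
        | s0 :: srest =>
          if pvPrec inp[i] > pvPrec s0 then parseGo fuel inp (i + 1) out (inp[i] :: s0 :: srest) skip
          else parseGo fuel inp (i + 1) (out ++ [s0]) (srest ++ [inp[i]]) skip
      else if PySem.Str.strIsdigit inp[i] then parseGo fuel inp (i + 1) (out ++ [inp[i]]) stack skip
      else parseGo fuel inp (i + 1) out stack skip
    else out ++ stack

def parse (inp : List String) : List String :=
  parseGo ((inp.length + 1) * (inp.length + 1)) inp 0 [] [] 0

-- ===== PORT B =====
-- Source B's loop body; state = (contexts, (out, stack))
def stepB (st : List (List String × List String) × List String × List String) (token : String) :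
    List (List String × List String) × List String × List String :=
  match st with
  | (ctxs, out, stack) =>
    if token = "(" then ((out, stack) :: ctxs, [], [])
    else if token = ")" then
      match ctxs with
      | [] => (ctxs, out, stack)                        -- stray ')': ignored
      | (po, ps) :: c2 => (c2, po ++ (out ++ stack), ps) -- pop context, splice inner result
    else if (pvPrec? token).isSome then
      match stack with
      | [] => (ctxs, out, stack ++ [token])
      | s0 :: sr =>
        if pvPrec token > pvPrec s0 then (ctxs, out, token :: s0 :: sr)
        else (ctxs, out ++ [s0], sr ++ [token])
    else if PySem.Str.strIsdigit token then (ctxs, out ++ [token], stack)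
    else (ctxs, out, stack)

def parse_alt (inp : List String) : List String :=
  match inp.foldl stepB ([], [], []) with
  | (_, out, stack) => out ++ stack
  -- Python raises "Syntax error: ( is not closed" when contexts ≠ []; unreachable under Pre_parse

-- ===== PRECONDITION & SPEC =====
-- clamped parenthesis depth: '(' opens, ')' closes the innermost open '(' (ignored when none is open)
def pvDepth : List String → Nat → Nat
  | [], d => d
  | t :: r, d => pvDepth r (if t = "(" then d + 1 else if t = ")" then d - 1 else d)

-- Pre_parse excludes exactly the inputs with an unmatched '(': there the Python A
-- raises Exception("Syntax error: ( is not closed") (and Python B raises too).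
def Pre_parse (inp : List String) : Prop := pvDepth inp 0 = 0
instance (inp : List String) : Decidable (Pre_parse inp) := by unfold Pre_parse; infer_instance

def pvWitness_parse : List String := ["(", "1", "+", "2", ")", "*", "3"]

def Spec_parse (inp : List String) (out : List String) : Prop := out = parse_alt inp
instance (inp : List String) (out : List String) : Decidable (Spec_parse inp out) := by
  unfold Spec_parse; infer_instance

-- ===== CLAIM (what is proved, stated in full; the proofs are below) =====
def Claim_equal_parse : Prop := ∀ (inp : List String), Dom_parse inp → Pre_parse inp → Spec_parse inp (parse inp)

-- ===== LEMMAS AND PROOFS =====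

-- unfolding helpers for the scan and the depth fold, by token class
theorem pvScan_cons (t : String) (r : List String) (c : Nat) :
    pvScan (t :: r) c =
      (if (if t = "(" then c + 1 else if t = ")" then c - 1 else c) = 0 then some []
       else (pvScan r (if t = "(" then c + 1 else if t = ")" then c - 1 else c)).map (t :: ·)) := rfl

theorem pvScan_cons_open (r : List String) (c : Nat) :
    pvScan ("(" :: r) c = (pvScan r (c + 1)).map ("(" :: ·) := by
  rw [pvScan_cons]; simp

theorem pvScan_cons_close (r : List String) (c : Nat) :
    pvScan (")" :: r) c = if c - 1 = 0 then some [] else (pvScan r (c - 1)).map (")" :: ·) := by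
  rw [pvScan_cons]; simp

theorem pvScan_cons_other {t : String} (ht1 : t ≠ "(") (ht2 : t ≠ ")") (r : List String) (c : Nat) :
    pvScan (t :: r) c = if c = 0 then some [] else (pvScan r c).map (t :: ·) := by
  rw [pvScan_cons]; simp [ht1, ht2]

theorem pvDepth_cons (t : String) (r : List String) (d : Nat) :
    pvDepth (t :: r) d = pvDepth r (if t = "(" then d + 1 else if t = ")" then d - 1 else d) := rfl

theorem pvDepth_cons_open (r : List String) (d : Nat) :
    pvDepth ("(" :: r) d = pvDepth r (d + 1) := by rw [pvDepth_cons]; simp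

theorem pvDepth_cons_close (r : List String) (d : Nat) :
    pvDepth (")" :: r) d = pvDepth r (d - 1) := by rw [pvDepth_cons]; simp

theorem pvDepth_cons_other {t : String} (ht1 : t ≠ "(") (ht2 : t ≠ ")") (r : List String) (d : Nat) :
    pvDepth (t :: r) d = pvDepth r d := by rw [pvDepth_cons]; simp [ht1, ht2]

-- termination helper for `parse` (cited in decreasing_by)
theorem pvScan_length : ∀ (r : List String) (c : Nat) (tokens : List String),
    pvScan r c = some tokens → tokens.length < r.length := by
  intro r
  induction r with
  | nil => intro c tokens h; simp [pvScan] at h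
  | cons t r2 ih =>
    intro c tokens h
    have h' : (if (if t = "(" then c + 1 else if t = ")" then c - 1 else c) = 0
        then some ([] : List String)
        else (pvScan r2 (if t = "(" then c + 1 else if t = ")" then c - 1 else c)).map (t :: ·))
        = some tokens := h
    by_cases hc : (if t = "(" then c + 1 else if t = ")" then c - 1 else c) = 0
    · rw [if_pos hc] at h'
      cases h'
      simp
    · rw [if_neg hc] at h'
      cases hs : pvScan r2 (if t = "(" then c + 1 else if t = ")" then c - 1 else c) with
      | none => rw [hs] at h'; simp at h'
      | some tk =>
        rw [hs] at h'
        simp at h'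
        have := ih _ _ hs
        simp [← h']
        omega

-- grammar of group contents (between '(' and its matching ')')
inductive BalT : List String → Prop
  | nil : BalT []
  | atom (t : String) (xs : List String) : t ≠ "(" → t ≠ ")" → BalT xs → BalT (t :: xs)
  | group (ys xs : List String) : BalT ys → BalT xs → BalT ("(" :: ys ++ ")" :: xs)

-- grammar of whole inputs admitted by Pre_parse (a stray ')' at depth 0 is an ignored atom)
inductive TopT : List String → Prop
  | nil : TopT []
  | atom (t : String) (xs : List String) : t ≠ "(" → TopT xs → TopT (t :: xs)
  | group (ys xs : List String) : BalT ys → TopT xs → TopT ("(" :: ys ++ ")" :: xs)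

-- the common action of a non-parenthesis token on (out, stack)
def pvTok : List String × List String → String → List String × List String
  | (out, stack), t =>
    if (pvPrec? t).isSome then
      match stack with
      | [] => (out, stack ++ [t])
      | s0 :: sr => if pvPrec t > pvPrec s0 then (out, t :: s0 :: sr) else (out ++ [s0], sr ++ [t])
    else if PySem.Str.strIsdigit t then (out ++ [t], stack)
    else (out, stack)

-- one level of A's algorithm, threading the (out, stack) pair (proof-side view of parseGo)
def runA : List String → List String × List String → List String × List String
  | [], p => p
  | t :: r, p =>
    if t = "(" then
      match hs : pvScan r 1 with
      | none => p
      | some tokens =>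
        let q := runA tokens ([], [])
        runA (r.drop tokens.length) (p.1 ++ (q.1 ++ q.2), p.2)
    else runA r (pvTok p t)
termination_by xs _ => xs.length
decreasing_by
  · have := pvScan_length _ _ _ hs; simp only [List.length_cons]; omega
  · simp only [List.length_drop, List.length_cons]; omega
  · simp only [List.length_cons]; omega

theorem runA_nil (p : List String × List String) : runA [] p = p := by rw [runA]

theorem runA_nonparen {t : String} (ht : t ≠ "(") (r : List String) (p : List String × List String) :
    runA (t :: r) p = runA r (pvTok p t) := by
  rw [runA, if_neg ht]

theorem runA_open_none {r : List String} (hs : pvScan r 1 = none) (p : List String × List String) :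
    runA ("(" :: r) p = p := by
  rw [runA, if_pos rfl]
  split
  · rfl
  · next tokens heq => rw [hs] at heq; cases heq

theorem runA_open_some {r tokens : List String} (hs : pvScan r 1 = some tokens)
    (p : List String × List String) :
    runA ("(" :: r) p =
      runA (r.drop tokens.length)
        (p.1 ++ ((runA tokens ([], [])).1 ++ (runA tokens ([], [])).2), p.2) := by
  rw [runA, if_pos rfl]
  split
  · next heq => rw [hs] at heq; cases heq
  · next toks heq =>
    rw [hs] at heq
    injection heq with h1
    subst h1
    rfl

-- pvTok computation lemmas
theorem pvTok_close (p : List String × List String) : pvTok p ")" = p := by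
  obtain ⟨o, s⟩ := p
  cases s <;> simp only [pvTok] <;>
    rw [if_neg (by decide), if_neg (by decide)]

theorem pvTok_op_nil {t : String} (h : (pvPrec? t).isSome) (out : List String) :
    pvTok (out, []) t = (out, [] ++ [t]) := by
  simp only [pvTok]
  rw [if_pos h]

theorem pvTok_op_gt {t s0 : String} (h : (pvPrec? t).isSome) (hgt : pvPrec t > pvPrec s0)
    (out : List String) (sr : List String) :
    pvTok (out, s0 :: sr) t = (out, t :: s0 :: sr) := by
  simp only [pvTok]
  rw [if_pos h]
  simp only [if_pos hgt]

theorem pvTok_op_le {t s0 : String} (h : (pvPrec? t).isSome) (hle : ¬ pvPrec t > pvPrec s0)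
    (out : List String) (sr : List String) :
    pvTok (out, s0 :: sr) t = (out ++ [s0], sr ++ [t]) := by
  simp only [pvTok]
  rw [if_pos h]
  simp only [if_neg hle]

theorem pvTok_digit {t : String} (h : ¬ (pvPrec? t).isSome = true)
    (hd : PySem.Str.strIsdigit t = true) (out stack : List String) :
    pvTok (out, stack) t = (out ++ [t], stack) := by
  cases stack <;> simp only [pvTok] <;> rw [if_neg h, if_pos hd]

theorem pvTok_other {t : String} (h : ¬ (pvPrec? t).isSome = true)
    (hd : ¬ PySem.Str.strIsdigit t = true) (p : List String × List String) :
    pvTok p t = p := by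
  obtain ⟨o, s⟩ := p
  cases s <;> simp only [pvTok] <;> rw [if_neg h, if_neg hd]

-- stepB computation lemmas
theorem stepB_open (ctxs : List (List String × List String)) (out stack : List String) :
    stepB (ctxs, out, stack) "(" = ((out, stack) :: ctxs, [], []) := by
  simp [stepB]

theorem stepB_close_cons (po ps : List String) (c2 : List (List String × List String))
    (out stack : List String) :
    stepB ((po, ps) :: c2, out, stack) ")" = (c2, po ++ (out ++ stack), ps) := by
  simp [stepB]

theorem stepB_close_nil (out stack : List String) :
    stepB (([] : List (List String × List String)), out, stack) ")" = ([], out, stack) := by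
  simp [stepB]

theorem stepB_nonparen {t : String} (ht1 : t ≠ "(") (ht2 : t ≠ ")")
    (ctxs : List (List String × List String)) (out stack : List String) :
    stepB (ctxs, out, stack) t = (ctxs, pvTok (out, stack) t) := by
  cases stack with
  | nil =>
    simp only [stepB, pvTok]
    rw [if_neg ht1, if_neg ht2]
    split_ifs <;> rfl
  | cons s0 sr =>
    simp only [stepB, pvTok]
    rw [if_neg ht1, if_neg ht2]
    by_cases hp : (pvPrec? t).isSome = true
    · rw [if_pos hp, if_pos hp]
      split_ifs <;> rfl
    · rw [if_neg hp, if_neg hp]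
      split_ifs <;> rfl

-- scanning past a balanced block
theorem pvScan_append_bal {ys : List String} (hb : BalT ys) :
    ∀ (c : Nat) (xs : List String), 1 ≤ c →
      pvScan (ys ++ xs) c = (pvScan xs c).map (ys ++ ·) := by
  induction hb with
  | nil => intro c xs _; cases h : pvScan xs c <;> simp [h]
  | atom t zs ht1 ht2 _ ih =>
    intro c xs hc
    rw [List.cons_append, pvScan_cons_other ht1 ht2, if_neg (by omega), ih c xs hc]
    cases h : pvScan xs c <;> simp [h]
  | group ys1 ys2 _ _ ih1 ih2 =>
    intro c xs hc
    have e : ("(" :: ys1 ++ ")" :: ys2) ++ xs = "(" :: (ys1 ++ (")" :: (ys2 ++ xs))) := by simp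
    rw [e, pvScan_cons_open, ih1 (c + 1) _ (by omega), pvScan_cons_close, if_neg (by omega),
      Nat.add_sub_cancel, ih2 c xs hc]
    cases h : pvScan xs c <;> simp [h]

theorem pvScan_group {ys : List String} (hb : BalT ys) (xs : List String) :
    pvScan (ys ++ ")" :: xs) 1 = some ys := by
  rw [pvScan_append_bal hb 1 (")" :: xs) le_rfl, pvScan_cons_close]
  simp

-- a successful scan splits off exactly the scanned tokens and their closing ')'
theorem pvScan_decomp : ∀ (r : List String) (c : Nat) (tokens : List String), 1 ≤ c →
    pvScan r c = some tokens → r = tokens ++ ")" :: r.drop (tokens.length + 1) := by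
  intro r
  induction r with
  | nil => intro c tokens _ h; simp [pvScan] at h
  | cons t r2 ih =>
    intro c tokens hc h
    by_cases ht1 : t = "("
    · subst ht1
      rw [pvScan_cons_open] at h
      cases hs : pvScan r2 (c + 1) with
      | none => rw [hs] at h; simp at h
      | some tk =>
        rw [hs] at h; simp at h
        subst h
        have ihh := ih (c + 1) tk (by omega) hs
        simp only [List.length_cons, List.cons_append, List.drop_succ_cons]
        exact congrArg _ ihh
    · by_cases ht2 : t = ")"
      · subst ht2
        rw [pvScan_cons_close] at h
        by_cases hc0 : c - 1 = 0
        · rw [if_pos hc0] at h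
          cases h
          simp
        · rw [if_neg hc0] at h
          cases hs : pvScan r2 (c - 1) with
          | none => rw [hs] at h; simp at h
          | some tk =>
            rw [hs] at h; simp at h
            subst h
            have ihh := ih (c - 1) tk (by omega) hs
            simp only [List.length_cons, List.cons_append, List.drop_succ_cons]
            exact congrArg _ ihh
      · rw [pvScan_cons_other ht1 ht2, if_neg (by omega)] at h
        cases hs : pvScan r2 c with
        | none => rw [hs] at h; simp at h
        | some tk =>
          rw [hs] at h; simp at h
          subst h
          have ihh := ih c tk (by omega) hs
          simp only [List.length_cons, List.cons_append, List.drop_succ_cons]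
          exact congrArg _ ihh

-- depth bookkeeping across a successful scan
theorem pvScan_depth : ∀ (r : List String) (c : Nat) (tokens : List String), 1 ≤ c →
    pvScan r c = some tokens → pvDepth r c = pvDepth (r.drop (tokens.length + 1)) 0 := by
  intro r
  induction r with
  | nil => intro c tokens _ h; simp [pvScan] at h
  | cons t r2 ih =>
    intro c tokens hc h
    by_cases ht1 : t = "("
    · subst ht1
      rw [pvScan_cons_open] at h
      cases hs : pvScan r2 (c + 1) with
      | none => rw [hs] at h; simp at h
      | some tk =>
        rw [hs] at h; simp at h
        subst h
        rw [pvDepth_cons_open]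
        simpa using ih (c + 1) tk (by omega) hs
    · by_cases ht2 : t = ")"
      · subst ht2
        rw [pvScan_cons_close] at h
        by_cases hc0 : c - 1 = 0
        · rw [if_pos hc0] at h
          cases h
          rw [pvDepth_cons_close, hc0]
          simp
        · rw [if_neg hc0] at h
          cases hs : pvScan r2 (c - 1) with
          | none => rw [hs] at h; simp at h
          | some tk =>
            rw [hs] at h; simp at h
            subst h
            rw [pvDepth_cons_close]
            simpa using ih (c - 1) tk (by omega) hs
      · rw [pvScan_cons_other ht1 ht2, if_neg (by omega)] at h
        cases hs : pvScan r2 c with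
        | none => rw [hs] at h; simp at h
        | some tk =>
          rw [hs] at h; simp at h
          subst h
          rw [pvDepth_cons_other ht1 ht2]
          simpa using ih c tk (by omega) hs

-- a scan succeeds whenever the clamped depth returns to 0
theorem pvScan_exists : ∀ (r : List String) (c : Nat), 1 ≤ c → pvDepth r c = 0 →
    ∃ tokens, pvScan r c = some tokens := by
  intro r
  induction r with
  | nil => intro c hc h; simp [pvDepth] at h; omega
  | cons t r2 ih =>
    intro c hc h
    by_cases ht1 : t = "("
    · subst ht1
      rw [pvDepth_cons_open] at h
      obtain ⟨tk, htk⟩ := ih (c + 1) (by omega) h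
      exact ⟨"(" :: tk, by rw [pvScan_cons_open, htk]; rfl⟩
    · by_cases ht2 : t = ")"
      · subst ht2
        rw [pvDepth_cons_close] at h
        by_cases hc0 : c - 1 = 0
        · exact ⟨[], by rw [pvScan_cons_close, if_pos hc0]⟩
        · obtain ⟨tk, htk⟩ := ih (c - 1) (by omega) h
          exact ⟨")" :: tk, by rw [pvScan_cons_close, if_neg hc0, htk]; rfl⟩
      · rw [pvDepth_cons_other ht1 ht2] at h
        obtain ⟨tk, htk⟩ := ih c hc h
        exact ⟨t :: tk, by rw [pvScan_cons_other ht1 ht2, if_neg (by omega), htk]; rfl⟩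

-- the scan result depends only on the consumed prefix
theorem pvScan_det : ∀ (tokens : List String) (c : Nat) (q q' : List String),
    pvScan (tokens ++ ")" :: q) c = some tokens → pvScan (tokens ++ ")" :: q') c = some tokens := by
  intro tokens
  induction tokens with
  | nil =>
    intro c q q' h
    rw [List.nil_append, pvScan_cons_close] at h ⊢
    by_cases hc0 : c - 1 = 0
    · rw [if_pos hc0]
    · rw [if_neg hc0] at h
      cases hs : pvScan q (c - 1) with
      | none => rw [hs] at h; simp at h
      | some tk => rw [hs] at h; simp at h
  | cons t tk ih =>
    intro c q q' h
    rw [List.cons_append] at h ⊢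
    by_cases ht1 : t = "("
    · subst ht1
      rw [pvScan_cons_open] at h ⊢
      cases hs : pvScan (tk ++ ")" :: q) (c + 1) with
      | none => rw [hs] at h; simp at h
      | some z =>
        rw [hs] at h; simp at h
        subst h
        rw [ih (c + 1) q q' hs]
        rfl
    · by_cases ht2 : t = ")"
      · subst ht2
        rw [pvScan_cons_close] at h ⊢
        by_cases hc0 : c - 1 = 0
        · rw [if_pos hc0] at h; simp at h
        · rw [if_neg hc0] at h ⊢
          cases hs : pvScan (tk ++ ")" :: q) (c - 1) with
          | none => rw [hs] at h; simp at h
          | some z =>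
            rw [hs] at h; simp at h
            subst h
            rw [ih (c - 1) q q' hs]
            rfl
      · rw [pvScan_cons_other ht1 ht2] at h ⊢
        by_cases hc0 : c = 0
        · rw [if_pos hc0] at h; simp at h
        · rw [if_neg hc0] at h ⊢
          cases hs : pvScan (tk ++ ")" :: q) c with
          | none => rw [hs] at h; simp at h
          | some z =>
            rw [hs] at h; simp at h
            subst h
            rw [ih c q q' hs]
            rfl

-- a scan from a + b splits at the intermediate return to b
theorem pvScan_split : ∀ (r : List String) (a b : Nat) (ys : List String), 1 ≤ a → 1 ≤ b →
    pvScan r (a + b) = some ys →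
    ∃ ys1 ys2, ys = ys1 ++ ")" :: ys2 ∧ pvScan r a = some ys1 ∧
      pvScan (r.drop (ys1.length + 1)) b = some ys2 := by
  intro r
  induction r with
  | nil => intro a b ys _ _ h; simp [pvScan] at h
  | cons t r2 ih =>
    intro a b ys ha hb h
    by_cases ht1 : t = "("
    · subst ht1
      rw [pvScan_cons_open] at h
      cases hs : pvScan r2 (a + b + 1) with
      | none => rw [hs] at h; simp at h
      | some z =>
        rw [hs] at h; simp at h
        subst h
        obtain ⟨z1, z2, hz, hsc1, hsc2⟩ :=
          ih (a + 1) b z (by omega) hb (by rw [show a + 1 + b = a + b + 1 by omega]; exact hs)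
        refine ⟨"(" :: z1, z2, by rw [hz]; rfl, ?_, ?_⟩
        · rw [pvScan_cons_open, hsc1]; rfl
        · simpa using hsc2
    · by_cases ht2 : t = ")"
      · subst ht2
        rw [pvScan_cons_close, if_neg (by omega)] at h
        by_cases ha1 : a = 1
        · subst ha1
          cases hs : pvScan r2 (1 + b - 1) with
          | none => rw [hs] at h; simp at h
          | some z =>
            rw [hs] at h; simp at h
            subst h
            refine ⟨[], z, rfl, ?_, ?_⟩
            · rw [pvScan_cons_close]; simp
            · simpa using (show pvScan r2 b = some z by
                rw [show b = 1 + b - 1 by omega]; exact hs)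
        · cases hs : pvScan r2 (a + b - 1) with
          | none => rw [hs] at h; simp at h
          | some z =>
            rw [hs] at h; simp at h
            subst h
            obtain ⟨z1, z2, hz, hsc1, hsc2⟩ :=
              ih (a - 1) b z (by omega) hb (by rw [show a - 1 + b = a + b - 1 by omega]; exact hs)
            refine ⟨")" :: z1, z2, by rw [hz]; rfl, ?_, ?_⟩
            · rw [pvScan_cons_close, if_neg (by omega), hsc1]; rfl
            · simpa using hsc2
      · rw [pvScan_cons_other ht1 ht2, if_neg (by omega)] at h
        cases hs : pvScan r2 (a + b) with
        | none => rw [hs] at h; simp at h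
        | some z =>
          rw [hs] at h; simp at h
          subst h
          obtain ⟨z1, z2, hz, hsc1, hsc2⟩ := ih a b z ha hb hs
          refine ⟨t :: z1, z2, by rw [hz]; rfl, ?_, ?_⟩
          · rw [pvScan_cons_other ht1 ht2, if_neg (by omega), hsc1]; rfl
          · simpa using hsc2

-- numeric balance implies the grammar (group contents)
theorem balT_decode : ∀ (n : Nat) (tokens : List String), tokens.length ≤ n →
    pvScan (tokens ++ [")"]) 1 = some tokens → BalT tokens := by
  intro n
  induction n with
  | zero =>
    intro tokens hlen _
    have : tokens = [] := List.length_eq_zero_iff.mp (by omega)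
    subst this; exact BalT.nil
  | succ n ih =>
    intro tokens hlen h
    cases tokens with
    | nil => exact BalT.nil
    | cons t tk =>
      have hlen2 : tk.length ≤ n := by simp at hlen; omega
      rw [List.cons_append] at h
      by_cases ht1 : t = "("
      · subst ht1
        rw [pvScan_cons_open] at h
        cases hs : pvScan (tk ++ [")"]) (1 + 1) with
        | none => rw [hs] at h; simp at h
        | some z =>
          rw [hs] at h; simp at h
          subst h
          obtain ⟨z1, z2, hz, hsc1, hsc2⟩ := pvScan_split (z ++ [")"]) 1 1 z le_rfl le_rfl hs
          have e1 : z ++ [")"] = z1 ++ ")" :: (z2 ++ [")"]) := by rw [hz]; simp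
          have hlens := congrArg List.length hz
          simp at hlens
          have hb1 : BalT z1 := by
            apply ih z1 (by omega)
            exact pvScan_det z1 1 (z2 ++ [")"]) [] (by rw [← e1]; exact hsc1)
          have hdrop : (z ++ [")"]).drop (z1.length + 1) = z2 ++ [")"] := by
            rw [e1, show z1 ++ ")" :: (z2 ++ [")"]) = (z1 ++ [")"]) ++ (z2 ++ [")"]) by simp,
              show z1.length + 1 = (z1 ++ [")"]).length by simp]
            exact List.drop_left
          have hb2 : BalT z2 := by
            apply ih z2 (by omega)
            rw [hdrop] at hsc2
            exact hsc2
          rw [hz]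
          exact BalT.group z1 z2 hb1 hb2
      · by_cases ht2 : t = ")"
        · subst ht2
          rw [pvScan_cons_close] at h
          simp at h
        · rw [pvScan_cons_other ht1 ht2, if_neg (by omega)] at h
          cases hs : pvScan (tk ++ [")"]) 1 with
          | none => rw [hs] at h; simp at h
          | some z =>
            rw [hs] at h; simp at h
            subst h
            exact BalT.atom t z ht1 ht2 (ih z hlen2 hs)

-- Pre_parse implies the top-level grammar
theorem topT_decode : ∀ (n : Nat) (r : List String), r.length ≤ n → pvDepth r 0 = 0 → TopT r := by
  intro n
  induction n with
  | zero =>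
    intro r hlen _
    have : r = [] := List.length_eq_zero_iff.mp (by omega)
    subst this; exact TopT.nil
  | succ n ih =>
    intro r hlen h
    cases r with
    | nil => exact TopT.nil
    | cons t r2 =>
      by_cases ht1 : t = "("
      · subst ht1
        rw [pvDepth_cons_open] at h
        have h1 : pvDepth r2 1 = 0 := by simpa using h
        obtain ⟨tokens, hscan⟩ := pvScan_exists r2 1 le_rfl h1
        obtain ⟨r2', hdec⟩ : ∃ r2', r2 = tokens ++ ")" :: r2' :=
          ⟨_, pvScan_decomp r2 1 tokens le_rfl hscan⟩
        subst hdec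
        have hdrop : (tokens ++ ")" :: r2').drop (tokens.length + 1) = r2' := by
          rw [show tokens ++ ")" :: r2' = (tokens ++ [")"]) ++ r2' by simp,
            show tokens.length + 1 = (tokens ++ [")"]).length by simp]
          exact List.drop_left
        have hb : BalT tokens := by
          apply balT_decode tokens.length tokens le_rfl
          exact pvScan_det tokens 1 r2' [] hscan
        have hd2 : pvDepth r2' 0 = 0 := by
          have hdd := pvScan_depth _ 1 tokens le_rfl hscan
          rw [hdrop] at hdd
          rw [← hdd]
          exact h1
        have htop2 : TopT r2' := ih r2' (by simp at hlen; omega) hd2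
        exact TopT.group _ _ hb htop2
      · by_cases ht2 : t = ")"
        · subst ht2
          rw [pvDepth_cons_close] at h
          exact TopT.atom ")" r2 ht1 (ih r2 (by simp at hlen; omega) (by simpa using h))
        · rw [pvDepth_cons_other ht1 ht2] at h
          exact TopT.atom t r2 ht1 (ih r2 (by simp at hlen; omega) h)

-- A's recursion on a '(' group, seen through runA
theorem runA_group {ys : List String} (hb : BalT ys) (xs : List String)
    (p : List String × List String) :
    runA ("(" :: ys ++ ")" :: xs) p =
      runA xs (p.1 ++ ((runA ys ([], [])).1 ++ (runA ys ([], [])).2), p.2) := by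
  show runA ("(" :: (ys ++ ")" :: xs)) p = _
  rw [runA_open_some (pvScan_group hb xs)]
  rw [show (ys ++ ")" :: xs).drop ys.length = ")" :: xs from List.drop_left]
  rw [runA_nonparen (by decide), pvTok_close]

-- B's fold across a balanced block: the context stack is untouched
theorem foldl_stepB_bal {ys : List String} (hb : BalT ys) :
    ∀ (ctxs : List (List String × List String)) (p : List String × List String),
      List.foldl stepB (ctxs, p) ys = (ctxs, runA ys p) := by
  induction hb with
  | nil => intro ctxs p; rw [runA_nil]; rfl
  | atom t zs ht1 ht2 _ ih =>
    intro ctxs p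
    obtain ⟨o, s⟩ := p
    rw [List.foldl_cons, stepB_nonparen ht1 ht2, ih, runA_nonparen ht1]
  | group ys1 ys2 hb1 _ ih1 ih2 =>
    intro ctxs p
    obtain ⟨o, s⟩ := p
    show List.foldl stepB (ctxs, o, s) ("(" :: (ys1 ++ ")" :: ys2)) = _
    rw [List.foldl_cons, stepB_open, List.foldl_append, ih1]
    rcases hq : runA ys1 ([], []) with ⟨qo, qs⟩
    rw [List.foldl_cons, stepB_close_cons, ih2, runA_group hb1, hq]

-- B's fold across a whole Pre_parse input
theorem foldl_stepB_top {r : List String} (ht : TopT r) :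
    ∀ (p : List String × List String),
      List.foldl stepB (([] : List (List String × List String)), p) r = ([], runA r p) := by
  induction ht with
  | nil => intro p; rw [runA_nil]; rfl
  | atom t zs ht1 _ ih =>
    intro p
    obtain ⟨o, s⟩ := p
    by_cases ht2 : t = ")"
    · subst ht2
      rw [List.foldl_cons, stepB_close_nil, ih, runA_nonparen (by decide), pvTok_close]
    · rw [List.foldl_cons, stepB_nonparen ht1 ht2, ih, runA_nonparen ht1]
  | group ys1 ys2 hb1 _ ih2 =>
    intro p
    obtain ⟨o, s⟩ := p
    show List.foldl stepB ([], o, s) ("(" :: (ys1 ++ ")" :: ys2)) = _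
    rw [List.foldl_cons, stepB_open, List.foldl_append, foldl_stepB_bal hb1]
    rcases hq : runA ys1 ([], []) with ⟨qo, qs⟩
    rw [List.foldl_cons, stepB_close_cons, ih2, runA_group hb1, hq]

-- A's index/skip loop computes runA of the still-unprocessed suffix (given enough fuel)
theorem parseGo_runA : ∀ (fuel : Nat) (inp : List String) (i : Nat) (out stack : List String)
    (skip : Nat), inp.length + 1 - i + inp.length * inp.length ≤ fuel →
    parseGo fuel inp i out stack skip =
      (runA (inp.drop (max i skip)) (out, stack)).1 ++
        (runA (inp.drop (max i skip)) (out, stack)).2 := by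
  refine parseGo.induct
    (fun fuel inp i out stack skip =>
      inp.length + 1 - i + inp.length * inp.length ≤ fuel →
      parseGo fuel inp i out stack skip =
        (runA (inp.drop (max i skip)) (out, stack)).1 ++
          (runA (inp.drop (max i skip)) (out, stack)).2)
    ?_ ?_ ?_ ?_ ?_ ?_ ?_ ?_ ?_ ?_
  · -- fuel exhausted: the bound forces the empty input
    intro inp i out stack skip hb
    have h0 : inp.length * inp.length = 0 := by omega
    have hL : inp.length = 0 := by
      rcases Nat.mul_eq_zero.mp h0 with h | h <;> exact h
    have hnil : inp = [] := List.length_eq_zero_iff.mp hL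
    subst hnil
    rw [parseGo, List.drop_nil, runA_nil]
  · -- skip > i
    intro fuel inp i out stack skip h1 h2 ih
    intro hb
    rw [parseGo, dif_pos h1, if_pos h2, ih (by omega),
      show max (i + 1) skip = max i skip by omega]
  · -- '(' with failing scan (the Python raises; Pre_parse excludes such inputs)
    intro fuel inp i out stack skip h hns hopen hscan
    intro hb
    rw [parseGo, dif_pos h, if_neg hns, if_pos hopen,
      show max i skip = i by omega,
      show inp.drop i = inp[i] :: inp.drop (i + 1) from (List.getElem_cons_drop h).symm,
      hopen, runA_open_none hscan]
    split
    · rfl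
    · next tokens heq => rw [hscan] at heq; cases heq
  · -- '(' with successful scan
    intro fuel inp i out stack skip h hns hopen tokens hscan ihp ih
    intro hb
    have hlt := pvScan_length _ _ _ hscan
    rw [List.length_drop] at hlt
    have h4 : tokens.length + 2 ≤ inp.length := by omega
    have hmul : (tokens.length + 2) * (tokens.length + 2) ≤ inp.length * inp.length :=
      Nat.mul_le_mul h4 h4
    have hexp : (tokens.length + 2) * (tokens.length + 2) =
        tokens.length * tokens.length + 4 * tokens.length + 4 := by ring
    have ihp' : parseGo fuel tokens 0 [] [] 0 =
        (runA tokens ([], [])).1 ++ (runA tokens ([], [])).2 := by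
      simpa using ihp (by omega)
    rw [parseGo, dif_pos h, if_neg hns, if_pos hopen]
    split
    · next heq => rw [hscan] at heq; cases heq
    · next toks heq =>
      rw [hscan] at heq
      injection heq with h1
      subst h1
      rw [ih (by omega), show max (i + 1) (i + tokens.length + 1) = i + tokens.length + 1 by omega,
        show max i skip = i by omega,
        show inp.drop i = inp[i] :: inp.drop (i + 1) from (List.getElem_cons_drop h).symm,
        hopen, runA_open_some hscan, List.drop_drop,
        show i + 1 + tokens.length = i + tokens.length + 1 by omega, ihp']
  · -- operator, empty stack
    intro fuel inp i out skip h hns hop hsome ih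
    intro hb
    rw [parseGo, dif_pos h, if_neg hns, if_neg hop, if_pos hsome]
    split
    · rw [ih (by omega), show max (i + 1) skip = i + 1 by omega, show max i skip = i by omega,
        show inp.drop i = inp[i] :: inp.drop (i + 1) from (List.getElem_cons_drop h).symm,
        runA_nonparen hop, pvTok_op_nil hsome]
    · rename_i heq
      cases heq
  · -- operator, strictly higher precedence
    intro fuel inp i out skip h hns hop hsome s0 srest hgt ih
    intro hb
    rw [parseGo, dif_pos h, if_neg hns, if_neg hop, if_pos hsome]
    split
    · rename_i heq
      cases heq
    · rename_i s0' srest' heq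
      injection heq with e1 e2
      subst e1
      subst e2
      rw [if_pos hgt, ih (by omega), show max (i + 1) skip = i + 1 by omega,
        show max i skip = i by omega,
        show inp.drop i = inp[i] :: inp.drop (i + 1) from (List.getElem_cons_drop h).symm,
        runA_nonparen hop, pvTok_op_gt hsome hgt]
  · -- operator, lower or equal precedence
    intro fuel inp i out skip h hns hop hsome s0 srest hle ih
    intro hb
    rw [parseGo, dif_pos h, if_neg hns, if_neg hop, if_pos hsome]
    split
    · rename_i heq
      cases heq
    · rename_i s0' srest' heq
      injection heq with e1 e2
      subst e1
      subst e2
      rw [if_neg hle, ih (by omega), show max (i + 1) skip = i + 1 by omega,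
        show max i skip = i by omega,
        show inp.drop i = inp[i] :: inp.drop (i + 1) from (List.getElem_cons_drop h).symm,
        runA_nonparen hop, pvTok_op_le hsome hle]
  · -- digit
    intro fuel inp i out stack skip h hns hop hsome hd ih
    intro hb
    rw [parseGo, dif_pos h, if_neg hns, if_neg hop, if_neg hsome, if_pos hd, ih (by omega),
      show max (i + 1) skip = i + 1 by omega, show max i skip = i by omega,
      show inp.drop i = inp[i] :: inp.drop (i + 1) from (List.getElem_cons_drop h).symm,
      runA_nonparen hop, pvTok_digit hsome hd]
  · -- ignored token
    intro fuel inp i out stack skip h hns hop hsome hd ih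
    intro hb
    rw [parseGo, dif_pos h, if_neg hns, if_neg hop, if_neg hsome, if_neg hd, ih (by omega),
      show max (i + 1) skip = i + 1 by omega, show max i skip = i by omega,
      show inp.drop i = inp[i] :: inp.drop (i + 1) from (List.getElem_cons_drop h).symm,
      runA_nonparen hop, pvTok_other hsome hd]
  · -- end of input
    intro fuel inp i out stack skip h
    intro hb
    rw [parseGo, dif_neg h, List.drop_eq_nil_of_le (by omega), runA_nil]

-- ===== VERDICT (by name: the statement is the Claim_ definition above) =====
theorem parse_spec : Claim_equal_parse := by
  intro inp _dom hpre
  show parse inp = parse_alt inp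
  have htop : TopT inp := topT_decode inp.length inp le_rfl hpre
  have hB : parse_alt inp = (runA inp ([], [])).1 ++ (runA inp ([], [])).2 := by
    unfold parse_alt
    rw [foldl_stepB_top htop ([], [])]
  have hA : parse inp = (runA inp ([], [])).1 ++ (runA inp ([], [])).2 := by
    rw [parse]
    have hexp : (inp.length + 1) * (inp.length + 1) =
        inp.length * inp.length + 2 * inp.length + 1 := by ring
    have hgo := parseGo_runA ((inp.length + 1) * (inp.length + 1)) inp 0 [] [] 0 (by omega)
    simpa using hgo
  rw [hA, hB]
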